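-- pv_equiv track=rewrite | github.com/SudaisX/pfun | keypad2.py | entryTime
-- ===== SOURCE A (Python) =====
-- def entryTime(s,keypad):
--     time = 0
--     a1 = keypad[0]
--     a2 = keypad[1]
--     a3 = keypad[2]
--     b1 = keypad[3]
--     b2 = keypad[4]
--     b3 = keypad[5]
--     c1 = keypad[6]
--     c2 = keypad[7]
--     c3 = keypad[8]
--     for i in range(len(s)):
--         if i == len(s)-1:
--             pass
--         else:
--             if s[i] == a1:
--                 if s[i+1] == a1 or i == len(s):
--                     time = time + 0
--                 elif s[i+1] == a2 or s[i+1] == b1 or s[i+1] == b2: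
--                     time = time + 1
--                 else:
--                     time = time + 2
--             elif s[i] == a2:
--                 if s[i+1] == a2 or i == len(s):
--                     time = time + 0
--                 elif s[i+1] == a1 or s[i+1] == b1 or s[i+1] == b2 or s[i+1] == b3 or s[i+1] == a3:
--                     time = time + 1
--                 else:
--                     time = time + 2
--             elif s[i] == a3:
--                 if s[i+1] == a3 or i == len(s):
--                     time = time + 0
--                 elif s[i+1] == a2 or s[i+1] == b2 or s[i+1] == b3:
--                     time = time + 1
--                 else:
--                     time = time + 2
--             elif s[i] == b1:
--                 if s[i+1] == b1 or i == len(s):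
--                     time = time + 0
--                 elif s[i+1] == a1 or s[i+1] == a2 or s[i+1] == b2 or s[i+1] == c1 or s[i+1] == c2:
--                     time = time + 1
--                 else:
--                     time = time + 2
--             elif s[i] == b2:
--                 if s[i+1] == b2 or i == len(s):
--                     time = time + 0
--                 else:
--                     time = time + 1
--             elif s[i] == b3:
--                 if s[i+1] == b3 or i == len(s):
--                     time = time + 0
--                 elif s[i+1] == a2 or s[i+1] == a3 or s[i+1] == b2 or s[i+1] == c2 or s[i+1] == c3:
--                     time = time + 1
--                 else:
--                     time = time + 2
--             elif s[i] == c1: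
--                 if s[i+1] == c1 or i == len(s):
--                     time = time + 0
--                 elif s[i+1] == b1 or s[i+1] == b2 or s[i+1] == c2:
--                     time = time + 1
--                 else:
--                     time = time + 2
--             elif s[i] == c2:
--                 if s[i+1] == c2 or i == len(s):
--                     time = time + 0
--                 elif s[i+1] == b1 or s[i+1] == b2 or s[i+1] == b3 or s[i+1] == c1 or s[i+1] == c3:
--                     time = time + 1
--                 else:
--                     time = time + 2
--             elif s[i] == c3:
--                 if s[i+1] == c3 or i == len(s):
--                     time = time + 0
--                 elif s[i+1] == c2 or s[i+1] == b2 or s[i+1] == b3: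
--                     time = time + 1
--                 else:
--                     time = time + 2
--     return time
-- ===== SOURCE B (Python) =====
-- def entryTime(s, keypad):
--     grid = [keypad[j] for j in range(9)]
--     total = 0
--     for x, y in zip(s, s[1:]):
--         if x in grid:
--             r, c = divmod(grid.index(x), 3)
--             total += min((max(abs(r - j // 3), abs(c - j % 3))
--                           for j in range(9) if grid[j] == y),
--                          default=2)  # a symbol with no key: cross the pad (diameter 2)
--     return total
-- ===== Notes on version B (the rewrite author's own statement) =====
-- stated objective: simpler
-- what changed: Replaces A's hardcoded 9-way per-key neighbour branch cascade with a position lookup on the 3x3 grid and a Chebyshev-distance minimum over the keys showing the next symbol, summed over consecutive pairs.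
-- intended difference: From the centre key of the pad A charges only 1 for a next symbol that is not on the keypad (its centre branch lacks the 'else 2' case it has everywhere else), while B uniformly charges the pad diameter 2; B's uniform charge is the intended cost of an absent symbol. — e.g. on entryTime(["5", "x"], ["1", "2", "3", "4", "5", "6", "7", "8", "9"]): A returns 1, B returns 2
import Mathlib
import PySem

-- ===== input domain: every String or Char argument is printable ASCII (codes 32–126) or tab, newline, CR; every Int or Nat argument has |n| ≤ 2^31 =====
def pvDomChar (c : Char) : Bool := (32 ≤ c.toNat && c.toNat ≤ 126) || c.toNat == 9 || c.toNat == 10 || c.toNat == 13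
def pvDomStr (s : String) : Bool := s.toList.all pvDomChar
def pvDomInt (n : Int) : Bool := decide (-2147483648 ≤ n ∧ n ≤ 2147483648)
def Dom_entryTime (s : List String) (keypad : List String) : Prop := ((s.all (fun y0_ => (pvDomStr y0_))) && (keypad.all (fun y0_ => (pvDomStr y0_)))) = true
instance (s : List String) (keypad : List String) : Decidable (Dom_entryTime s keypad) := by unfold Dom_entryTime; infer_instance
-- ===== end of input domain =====

-- B replaces A's hardcoded per-key neighbour branch cascade by a grid-position lookup plus a
-- Chebyshev-distance minimum over matching keys (objective: simpler); from the centre key to a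
-- symbol that is not on the keypad, A and B intentionally differ (see D_entryTime).


-- ===== PORT A =====
-- A-side helper: the literal body of A's 'for i in range(len(s))' loop
-- (s[i]/s[i+1] are always in range where read, so List.getD is exact here)
def entryTime_body (a1 a2 a3 b1 b2 b3 c1 c2 c3 : String) (s : List String)
    (time : Int) (i : Nat) : Int :=
  if i = s.length - 1 then time
  else
    let x := s.getD i ""
    let y := s.getD (i + 1) ""
    if x = a1 then
      if y = a1 ∨ i = s.length then time + 0
      else if y = a2 ∨ y = b1 ∨ y = b2 then time + 1
      else time + 2
    else if x = a2 then
      if y = a2 ∨ i = s.length then time + 0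
      else if y = a1 ∨ y = b1 ∨ y = b2 ∨ y = b3 ∨ y = a3 then time + 1
      else time + 2
    else if x = a3 then
      if y = a3 ∨ i = s.length then time + 0
      else if y = a2 ∨ y = b2 ∨ y = b3 then time + 1
      else time + 2
    else if x = b1 then
      if y = b1 ∨ i = s.length then time + 0
      else if y = a1 ∨ y = a2 ∨ y = b2 ∨ y = c1 ∨ y = c2 then time + 1
      else time + 2
    else if x = b2 then
      if y = b2 ∨ i = s.length then time + 0
      else time + 1
    else if x = b3 then
      if y = b3 ∨ i = s.length then time + 0
      else if y = a2 ∨ y = a3 ∨ y = b2 ∨ y = c2 ∨ y = c3 then time + 1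
      else time + 2
    else if x = c1 then
      if y = c1 ∨ i = s.length then time + 0
      else if y = b1 ∨ y = b2 ∨ y = c2 then time + 1
      else time + 2
    else if x = c2 then
      if y = c2 ∨ i = s.length then time + 0
      else if y = b1 ∨ y = b2 ∨ y = b3 ∨ y = c1 ∨ y = c3 then time + 1
      else time + 2
    else if x = c3 then
      if y = c3 ∨ i = s.length then time + 0
      else if y = c2 ∨ y = b2 ∨ y = b3 then time + 1
      else time + 2
    else time

def entryTime (s : List String) (keypad : List String) : Int :=
  match keypad with
  | a1 :: a2 :: a3 :: b1 :: b2 :: b3 :: c1 :: c2 :: c3 :: _ =>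
    (List.range s.length).foldl (entryTime_body a1 a2 a3 b1 b2 b3 c1 c2 c3 s) 0
  | _ => 0  -- keypad[k] raises IndexError in A: excluded by Pre_

-- ===== PORT B =====
-- B-side helper: the per-pair cost of Source B's loop body
-- (grid[j] for j < 9 is exact as getD: grid always has length 9;
--  the 'none => 0' fallback is unreachable: the guard gives x ∈ grid)
def entryTime_cost (grid : List String) (x y : String) : Int :=
  if x ∈ grid then
    match PySem.List.index? grid x with
    | none => 0
    | some p =>
      let r : Int := (p / 3 : Nat)
      let c : Int := (p % 3 : Nat)
      let ds : List Int := (List.range 9).filterMap (fun j =>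
        if grid.getD j "" = y then some (max |r - ((j / 3 : Nat) : Int)| |c - ((j % 3 : Nat) : Int)|)
        else none)
      match PySem.List.min? ds (fun z => z) with
      | none => 2  -- min(..., default=2)
      | some m => m
  else 0

def entryTime_alt (s : List String) (keypad : List String) : Int :=
  let grid := (List.range 9).map (fun j => keypad.getD j "")  -- keypad[j] for j in range(9): exact as getD under Pre_ (9 ≤ len)
  ((s.zip s.tail).map (fun ab => entryTime_cost grid ab.1 ab.2)).sum

-- ===== PRECONDITION & SPEC =====
-- A reads keypad[0]..keypad[8] unconditionally: Pre_ excludes keypads of fewer than 9 keys,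
-- on which A raises IndexError.
def Pre_entryTime (s : List String) (keypad : List String) : Prop := 9 ≤ keypad.length
instance (s : List String) (keypad : List String) : Decidable (Pre_entryTime s keypad) := by unfold Pre_entryTime; infer_instance
def pvWitness_entryTime : List String × List String :=
  (["1", "5", "9"], ["1", "2", "3", "4", "5", "6", "7", "8", "9"])

-- From the key at the centre of the pad, A charges 1 for a next symbol that is not on the
-- keypad (its centre branch has no 'else 2' case), although from every other key an absent
-- symbol costs 2; B uniformly charges the pad diameter 2, the intended cost of an absent symbol.
def D_entryTime (s : List String) (keypad : List String) : Prop :=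
  ∃ ab ∈ s.zip s.tail, PySem.List.index? (keypad.take 9) ab.1 = some 4 ∧ ab.2 ∉ keypad.take 9
instance (s : List String) (keypad : List String) : Decidable (D_entryTime s keypad) := by unfold D_entryTime; infer_instance

def Spec_entryTime (s : List String) (keypad : List String) (out : Int) : Prop := ¬ D_entryTime s keypad → out = entryTime_alt s keypad
instance (s : List String) (keypad : List String) (out : Int) : Decidable (Spec_entryTime s keypad out) := by unfold Spec_entryTime; infer_instance

def pvDiffWitness_entryTime : List String × List String :=
  (["5", "x"], ["1", "2", "3", "4", "5", "6", "7", "8", "9"])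
def pvDiffWitnessOut_entryTime : Int × Int := (1, 2)

-- ===== CLAIM (what is proved, stated in full; the proofs are below) =====
def Claim_unchanged_entryTime : Prop := ∀ (s : List String) (keypad : List String), Dom_entryTime s keypad → Pre_entryTime s keypad → Spec_entryTime s keypad (entryTime s keypad)
def Claim_changed_entryTime : Prop := Dom_entryTime (pvDiffWitness_entryTime.1) (pvDiffWitness_entryTime.2) ∧ Pre_entryTime (pvDiffWitness_entryTime.1) (pvDiffWitness_entryTime.2) ∧ D_entryTime (pvDiffWitness_entryTime.1) (pvDiffWitness_entryTime.2) ∧ entryTime (pvDiffWitness_entryTime.1) (pvDiffWitness_entryTime.2) = pvDiffWitnessOut_entryTime.1 ∧ entryTime_alt (pvDiffWitness_entryTime.1) (pvDiffWitness_entryTime.2) = pvDiffWitnessOut_entryTime.2 ∧ pvDiffWitnessOut_entryTime.1 ≠ pvDiffWitnessOut_entryTime.2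
def Claim_exact_entryTime : Prop := ∀ (s : List String) (keypad : List String), Dom_entryTime s keypad → Pre_entryTime s keypad → D_entryTime s keypad → entryTime s keypad ≠ entryTime_alt s keypad

-- ===== LEMMAS AND PROOFS =====

-- A's per-step increment, as a pure function of the two symbols
def stepA (a1 a2 a3 b1 b2 b3 c1 c2 c3 x y : String) : Int :=
  if x = a1 then (if y = a1 then 0 else if y = a2 ∨ y = b1 ∨ y = b2 then 1 else 2)
  else if x = a2 then (if y = a2 then 0 else if y = a1 ∨ y = b1 ∨ y = b2 ∨ y = b3 ∨ y = a3 then 1 else 2)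
  else if x = a3 then (if y = a3 then 0 else if y = a2 ∨ y = b2 ∨ y = b3 then 1 else 2)
  else if x = b1 then (if y = b1 then 0 else if y = a1 ∨ y = a2 ∨ y = b2 ∨ y = c1 ∨ y = c2 then 1 else 2)
  else if x = b2 then (if y = b2 then 0 else 1)
  else if x = b3 then (if y = b3 then 0 else if y = a2 ∨ y = a3 ∨ y = b2 ∨ y = c2 ∨ y = c3 then 1 else 2)
  else if x = c1 then (if y = c1 then 0 else if y = b1 ∨ y = b2 ∨ y = c2 then 1 else 2)
  else if x = c2 then (if y = c2 then 0 else if y = b1 ∨ y = b2 ∨ y = b3 ∨ y = c1 ∨ y = c3 then 1 else 2)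
  else if x = c3 then (if y = c3 then 0 else if y = c2 ∨ y = b2 ∨ y = b3 then 1 else 2)
  else 0

lemma body_shift (a1 a2 a3 b1 b2 b3 c1 c2 c3 x : String) (s : List String)
    (t : Int) (i : Nat) (hi : i < s.length) :
    entryTime_body a1 a2 a3 b1 b2 b3 c1 c2 c3 (x :: s) t (i + 1) =
    entryTime_body a1 a2 a3 b1 b2 b3 c1 c2 c3 s t i := by
  have h1 : (i + 1 = (x :: s).length - 1) = (i = s.length - 1) := by
    simp only [List.length_cons]; exact propext (by omega)
  have h2 : (i + 1 = (x :: s).length) = (i = s.length) := by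
    simp only [List.length_cons]; exact propext (by omega)
  simp only [entryTime_body, List.getD_cons_succ, h1, h2]

set_option maxHeartbeats 2000000 in
lemma loopA_eq (a1 a2 a3 b1 b2 b3 c1 c2 c3 : String) (s : List String) (t : Int) :
    (List.range s.length).foldl (entryTime_body a1 a2 a3 b1 b2 b3 c1 c2 c3 s) t =
    t + ((s.zip s.tail).map (fun ab => stepA a1 a2 a3 b1 b2 b3 c1 c2 c3 ab.1 ab.2)).sum := by
  induction s generalizing t with
  | nil => simp
  | cons x s ih =>
    rw [List.length_cons, List.range_succ_eq_map, List.foldl_cons, List.foldl_map]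
    rw [PySem.List.foldl_congr_mem (List.range s.length) _
      (entryTime_body a1 a2 a3 b1 b2 b3 c1 c2 c3 s) _
      (fun t i hi => body_shift a1 a2 a3 b1 b2 b3 c1 c2 c3 x s t i (List.mem_range.mp hi))]
    rw [ih]
    cases s with
    | nil => simp [entryTime_body]
    | cons y s' =>
      have h0 : entryTime_body a1 a2 a3 b1 b2 b3 c1 c2 c3 (x :: y :: s') t 0 =
          t + stepA a1 a2 a3 b1 b2 b3 c1 c2 c3 x y := by
        rw [entryTime_body, if_neg (show ¬ ((0 : Nat) = (x :: y :: s').length - 1) by simp)]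
        simp only [List.getD_cons_zero, List.getD_cons_succ,
          show ((0 : Nat) = (x :: y :: s').length) = False by simp, or_false, stepA]
        by_cases h0 : x = a1
        · simp only [if_pos h0]; split_ifs <;> omega
        simp only [if_neg h0]
        by_cases h1 : x = a2
        · simp only [if_pos h1]; split_ifs <;> omega
        simp only [if_neg h1]
        by_cases h2 : x = a3
        · simp only [if_pos h2]; split_ifs <;> omega
        simp only [if_neg h2]
        by_cases h3 : x = b1
        · simp only [if_pos h3]; split_ifs <;> omega
        simp only [if_neg h3]
        by_cases h4 : x = b2
        · simp only [if_pos h4]; split_ifs <;> omega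
        simp only [if_neg h4]
        by_cases h5 : x = b3
        · simp only [if_pos h5]; split_ifs <;> omega
        simp only [if_neg h5]
        by_cases h6 : x = c1
        · simp only [if_pos h6]; split_ifs <;> omega
        simp only [if_neg h6]
        by_cases h7 : x = c2
        · simp only [if_pos h7]; split_ifs <;> omega
        simp only [if_neg h7]
        by_cases h8 : x = c3
        · simp only [if_pos h8]; split_ifs <;> omega
        simp only [if_neg h8]
        omega
      rw [h0]
      simp only [List.zip_cons_cons, List.tail_cons, List.map_cons, List.sum_cons]
      ring


lemma minMatchD (l : List Int) (d c : Int) (hc : c ∈ l) (hb : ∀ z ∈ l, c ≤ z) :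
    (PySem.List.min? l (fun z => z)).getD d = c := by
  cases h : PySem.List.min? l (fun z => z) with
  | none => rw [PySem.List.min?_eq_none_iff] at h; subst h; cases hc
  | some m => exact le_antisymm (PySem.List.min?_isMin h c hc) (hb m (PySem.List.min?_mem h))

lemma minMatchNe (l : List Int) (d c : Int) (hne : l ≠ []) (h : ∀ z ∈ l, z = c) :
    (PySem.List.min? l (fun z => z)).getD d = c := by
  cases hm : PySem.List.min? l (fun z => z) with
  | none => rw [PySem.List.min?_eq_none_iff] at hm; exact absurd hm hne
  | some m => exact h m (PySem.List.min?_mem hm)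

lemma minAll2 (l : List Int) (h : ∀ z ∈ l, z = 2) :
    (PySem.List.min? l (fun z => z)).getD 2 = 2 := by
  cases hm : PySem.List.min? l (fun z => z) with
  | none => rfl
  | some m => exact h m (PySem.List.min?_mem hm)

lemma dist_ge1 (p j : Nat) (hp : p < 9) (hj : j < 9) (hne : j ≠ p) :
    1 ≤ max |((p / 3 : Nat) : Int) - ((j / 3 : Nat) : Int)| |((p % 3 : Nat) : Int) - ((j % 3 : Nat) : Int)| := by
  by_cases h : p / 3 = j / 3
  · exact le_max_of_le_right (Int.one_le_abs (by omega))
  · exact le_max_of_le_left (Int.one_le_abs (by omega))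

lemma dist_le2 (p j : Nat) (hp : p < 9) (hj : j < 9) :
    max |((p / 3 : Nat) : Int) - ((j / 3 : Nat) : Int)| |((p % 3 : Nat) : Int) - ((j % 3 : Nat) : Int)| ≤ 2 :=
  max_le (abs_le.mpr ⟨by omega, by omega⟩) (abs_le.mpr ⟨by omega, by omega⟩)

lemma ds_nonneg (g : List String) (y : String) (r c : Int) :
    ∀ z ∈ (List.range 9).filterMap (fun j =>
      if g.getD j "" = y then some (max |r - ((j / 3 : Nat) : Int)| |c - ((j % 3 : Nat) : Int)|) else none),
      0 ≤ z := by
  intro z hz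
  obtain ⟨j, _, hf⟩ := List.mem_filterMap.mp hz
  split at hf
  · injection hf with e; rw [← e]; exact le_max_of_le_left (abs_nonneg _)
  · simp at hf

lemma ds_ne_nil (g : List String) (y : String) (r c : Int) (hlen : g.length ≤ 9) (hy : y ∈ g) :
    (List.range 9).filterMap (fun j =>
      if g.getD j "" = y then some (max |r - ((j / 3 : Nat) : Int)| |c - ((j % 3 : Nat) : Int)|) else none) ≠ [] := by
  obtain ⟨j, hj, hgj⟩ := List.mem_iff_getElem.mp hy
  intro hnil
  have hmem : max |r - ((j / 3 : Nat) : Int)| |c - ((j % 3 : Nat) : Int)| ∈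
      (List.range 9).filterMap (fun j =>
        if g.getD j "" = y then some (max |r - ((j / 3 : Nat) : Int)| |c - ((j % 3 : Nat) : Int)|) else none) := by
    refine List.mem_filterMap.mpr ⟨j, List.mem_range.mpr (lt_of_lt_of_le hj hlen), ?_⟩
    rw [List.getD_eq_getElem g "" hj, hgj]
    simp
  rw [hnil] at hmem
  cases hmem

lemma ds_none (g : List String) (y : String) (r c : Int) (hlen : g.length = 9) (hy : y ∉ g) :
    ∀ z ∈ (List.range 9).filterMap (fun j =>
      if g.getD j "" = y then some (max |r - ((j / 3 : Nat) : Int)| |c - ((j % 3 : Nat) : Int)|) else none),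
      z = 2 := by
  intro z hz
  obtain ⟨j, hj, hf⟩ := List.mem_filterMap.mp hz
  rw [List.mem_range] at hj
  split at hf
  · rename_i h
    exfalso
    have hjl : j < g.length := by omega
    rw [List.getD_eq_getElem g "" hjl] at h
    exact hy (h ▸ List.getElem_mem hjl)
  · simp at hf

lemma ds_ge1 (g : List String) (y : String) (p : Nat) (hp : p < 9) (hnot : ¬ (g.getD p "" = y)) :
    ∀ z ∈ (List.range 9).filterMap (fun j =>
      if g.getD j "" = y then some (max |((p / 3 : Nat) : Int) - ((j / 3 : Nat) : Int)| |((p % 3 : Nat) : Int) - ((j % 3 : Nat) : Int)|) else none),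
      1 ≤ z := by
  intro z hz
  obtain ⟨j, hj, hf⟩ := List.mem_filterMap.mp hz
  rw [List.mem_range] at hj
  split at hf
  · rename_i h
    have hjp : j ≠ p := fun e => hnot (e ▸ h)
    injection hf with e
    rw [← e]
    exact dist_ge1 p j hp hj hjp
  · simp at hf

lemma ds_far (g : List String) (y : String) (p : Nat) (hp : p < 9)
    (hnear : ∀ j, j < 9 →
      max |((p / 3 : Nat) : Int) - ((j / 3 : Nat) : Int)| |((p % 3 : Nat) : Int) - ((j % 3 : Nat) : Int)| ≤ 1 →
      ¬ (g.getD j "" = y)) :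
    ∀ z ∈ (List.range 9).filterMap (fun j =>
      if g.getD j "" = y then some (max |((p / 3 : Nat) : Int) - ((j / 3 : Nat) : Int)| |((p % 3 : Nat) : Int) - ((j % 3 : Nat) : Int)|) else none),
      z = 2 := by
  intro z hz
  obtain ⟨j, hj, hf⟩ := List.mem_filterMap.mp hz
  rw [List.mem_range] at hj
  split at hf
  · rename_i h
    by_cases hd : max |((p / 3 : Nat) : Int) - ((j / 3 : Nat) : Int)| |((p % 3 : Nat) : Int) - ((j % 3 : Nat) : Int)| ≤ 1
    · exact absurd h (hnear j hj hd)
    · injection hf with e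
      rw [← e]
      have h2 := dist_le2 p j hp hj
      have h1 := lt_of_not_ge hd
      linarith
  · simp at hf

lemma ds_center (g : List String) (y : String) (hnot : ¬ (g.getD 4 "" = y)) :
    ∀ z ∈ (List.range 9).filterMap (fun j =>
      if g.getD j "" = y then some (max |((4 / 3 : Nat) : Int) - ((j / 3 : Nat) : Int)| |((4 % 3 : Nat) : Int) - ((j % 3 : Nat) : Int)|) else none),
      z = 1 := by
  intro z hz
  obtain ⟨j, hj, hf⟩ := List.mem_filterMap.mp hz
  rw [List.mem_range] at hj
  split at hf
  · rename_i h
    have hjp : j ≠ 4 := fun e => hnot (e ▸ h)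
    injection hf with e
    rw [← e]
    refine le_antisymm (max_le (abs_le.mpr ⟨by omega, by omega⟩) (abs_le.mpr ⟨by omega, by omega⟩))
      (dist_ge1 4 j (by omega) hj hjp)
  · simp at hf

lemma cost_found (g : List String) (x y : String) (p : Nat)
    (hx : x ∈ g)
    (hidx : PySem.List.index? g x = some p) :
    entryTime_cost g x y =
    (PySem.List.min? ((List.range 9).filterMap (fun j =>
        if g.getD j "" = y then
          some (max |((p / 3 : Nat) : Int) - ((j / 3 : Nat) : Int)| |((p % 3 : Nat) : Int) - ((j % 3 : Nat) : Int)|)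
        else none)) (fun z => z)).getD 2 := by
  simp only [entryTime_cost, if_pos hx, hidx]
  cases PySem.List.min? ((List.range 9).filterMap (fun j =>
      if g.getD j "" = y then
        some (max |((p / 3 : Nat) : Int) - ((j / 3 : Nat) : Int)| |((p % 3 : Nat) : Int) - ((j % 3 : Nat) : Int)|)
      else none)) (fun z => z) <;> rfl

lemma cost_noguard (g : List String) (x y : String)
    (h : x ∉ g) :
    entryTime_cost g x y = 0 := by
  simp only [entryTime_cost, if_neg h]

set_option maxHeartbeats 4000000 in
lemma step_eq_cost (a1 a2 a3 b1 b2 b3 c1 c2 c3 x y : String)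
    (hc : PySem.List.index? [a1, a2, a3, b1, b2, b3, c1, c2, c3] x = some 4 → y ∈ [a1, a2, a3, b1, b2, b3, c1, c2, c3]) :
    stepA a1 a2 a3 b1 b2 b3 c1 c2 c3 x y =
    entryTime_cost [a1, a2, a3, b1, b2, b3, c1, c2, c3] x y := by
  rw [stepA]
  by_cases h0 : x = a1
  · rw [if_pos h0]
    have hag : x ∈ [a1, a2, a3, b1, b2, b3, c1, c2, c3] := by simp [h0]
    have hidx : PySem.List.index? [a1, a2, a3, b1, b2, b3, c1, c2, c3] x = some 0 := by
      rw [h0, PySem.List.index?_cons_self]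
    rw [cost_found [a1, a2, a3, b1, b2, b3, c1, c2, c3] x y 0 hag hidx]
    by_cases hy0 : y = a1
    · rw [if_pos hy0]
      refine (minMatchD _ _ 0 ?_ (ds_nonneg [a1, a2, a3, b1, b2, b3, c1, c2, c3] y ((0 / 3 : Nat) : Int) ((0 % 3 : Nat) : Int))).symm
      refine List.mem_filterMap.mpr ⟨0, by decide, ?_⟩
      rw [show ([a1, a2, a3, b1, b2, b3, c1, c2, c3].getD 0 "") = a1 from rfl, if_pos hy0.symm]; decide
    rw [if_neg hy0]
    have hy0' : ¬ (a1 = y) := fun hh => hy0 hh.symm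
    by_cases hy1 : y = a2 ∨ y = b1 ∨ y = b2
    · rw [if_pos hy1]
      refine (minMatchD _ _ 1 ?_ (ds_ge1 [a1, a2, a3, b1, b2, b3, c1, c2, c3] y 0 (by decide) hy0')).symm
      rcases hy1 with h | h | h
      · refine List.mem_filterMap.mpr ⟨1, by decide, ?_⟩
        rw [show ([a1, a2, a3, b1, b2, b3, c1, c2, c3].getD 1 "") = a2 from rfl, if_pos h.symm]; decide
      · refine List.mem_filterMap.mpr ⟨3, by decide, ?_⟩
        rw [show ([a1, a2, a3, b1, b2, b3, c1, c2, c3].getD 3 "") = b1 from rfl, if_pos h.symm]; decide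
      · refine List.mem_filterMap.mpr ⟨4, by decide, ?_⟩
        rw [show ([a1, a2, a3, b1, b2, b3, c1, c2, c3].getD 4 "") = b2 from rfl, if_pos h.symm]; decide
    · rw [if_neg hy1]
      push_neg at hy1
      obtain ⟨k1, k2, k3⟩ := hy1
      refine (minAll2 _ (ds_far [a1, a2, a3, b1, b2, b3, c1, c2, c3] y 0 (by decide) ?_)).symm
      intro j hj hd
      interval_cases j <;>
        first
          | exact absurd hd (by decide)
          | exact hy0'
          | exact fun hh => k1 hh.symm
          | exact fun hh => k2 hh.symm
          | exact fun hh => k3 hh.symm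
  rw [if_neg h0]
  by_cases h1 : x = a2
  · rw [if_pos h1]
    have hag : x ∈ [a1, a2, a3, b1, b2, b3, c1, c2, c3] := by simp [h1]
    have hidx : PySem.List.index? [a1, a2, a3, b1, b2, b3, c1, c2, c3] x = some 1 := by
      rw [PySem.List.index?_cons_of_ne _ (show a1 ≠ x from fun hh => h0 hh.symm), h1, PySem.List.index?_cons_self]
      rfl
    rw [cost_found [a1, a2, a3, b1, b2, b3, c1, c2, c3] x y 1 hag hidx]
    by_cases hy0 : y = a2
    · rw [if_pos hy0]
      refine (minMatchD _ _ 0 ?_ (ds_nonneg [a1, a2, a3, b1, b2, b3, c1, c2, c3] y ((1 / 3 : Nat) : Int) ((1 % 3 : Nat) : Int))).symm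
      refine List.mem_filterMap.mpr ⟨1, by decide, ?_⟩
      rw [show ([a1, a2, a3, b1, b2, b3, c1, c2, c3].getD 1 "") = a2 from rfl, if_pos hy0.symm]; decide
    rw [if_neg hy0]
    have hy0' : ¬ (a2 = y) := fun hh => hy0 hh.symm
    by_cases hy1 : y = a1 ∨ y = b1 ∨ y = b2 ∨ y = b3 ∨ y = a3
    · rw [if_pos hy1]
      refine (minMatchD _ _ 1 ?_ (ds_ge1 [a1, a2, a3, b1, b2, b3, c1, c2, c3] y 1 (by decide) hy0')).symm
      rcases hy1 with h | h | h | h | h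
      · refine List.mem_filterMap.mpr ⟨0, by decide, ?_⟩
        rw [show ([a1, a2, a3, b1, b2, b3, c1, c2, c3].getD 0 "") = a1 from rfl, if_pos h.symm]; decide
      · refine List.mem_filterMap.mpr ⟨3, by decide, ?_⟩
        rw [show ([a1, a2, a3, b1, b2, b3, c1, c2, c3].getD 3 "") = b1 from rfl, if_pos h.symm]; decide
      · refine List.mem_filterMap.mpr ⟨4, by decide, ?_⟩
        rw [show ([a1, a2, a3, b1, b2, b3, c1, c2, c3].getD 4 "") = b2 from rfl, if_pos h.symm]; decide
      · refine List.mem_filterMap.mpr ⟨5, by decide, ?_⟩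
        rw [show ([a1, a2, a3, b1, b2, b3, c1, c2, c3].getD 5 "") = b3 from rfl, if_pos h.symm]; decide
      · refine List.mem_filterMap.mpr ⟨2, by decide, ?_⟩
        rw [show ([a1, a2, a3, b1, b2, b3, c1, c2, c3].getD 2 "") = a3 from rfl, if_pos h.symm]; decide
    · rw [if_neg hy1]
      push_neg at hy1
      obtain ⟨k1, k2, k3, k4, k5⟩ := hy1
      refine (minAll2 _ (ds_far [a1, a2, a3, b1, b2, b3, c1, c2, c3] y 1 (by decide) ?_)).symm
      intro j hj hd
      interval_cases j <;>
        first
          | exact absurd hd (by decide)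
          | exact hy0'
          | exact fun hh => k1 hh.symm
          | exact fun hh => k2 hh.symm
          | exact fun hh => k3 hh.symm
          | exact fun hh => k4 hh.symm
          | exact fun hh => k5 hh.symm
  rw [if_neg h1]
  by_cases h2 : x = a3
  · rw [if_pos h2]
    have hag : x ∈ [a1, a2, a3, b1, b2, b3, c1, c2, c3] := by simp [h2]
    have hidx : PySem.List.index? [a1, a2, a3, b1, b2, b3, c1, c2, c3] x = some 2 := by
      rw [PySem.List.index?_cons_of_ne _ (show a1 ≠ x from fun hh => h0 hh.symm), PySem.List.index?_cons_of_ne _ (show a2 ≠ x from fun hh => h1 hh.symm), h2, PySem.List.index?_cons_self]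
      rfl
    rw [cost_found [a1, a2, a3, b1, b2, b3, c1, c2, c3] x y 2 hag hidx]
    by_cases hy0 : y = a3
    · rw [if_pos hy0]
      refine (minMatchD _ _ 0 ?_ (ds_nonneg [a1, a2, a3, b1, b2, b3, c1, c2, c3] y ((2 / 3 : Nat) : Int) ((2 % 3 : Nat) : Int))).symm
      refine List.mem_filterMap.mpr ⟨2, by decide, ?_⟩
      rw [show ([a1, a2, a3, b1, b2, b3, c1, c2, c3].getD 2 "") = a3 from rfl, if_pos hy0.symm]; decide
    rw [if_neg hy0]
    have hy0' : ¬ (a3 = y) := fun hh => hy0 hh.symm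
    by_cases hy1 : y = a2 ∨ y = b2 ∨ y = b3
    · rw [if_pos hy1]
      refine (minMatchD _ _ 1 ?_ (ds_ge1 [a1, a2, a3, b1, b2, b3, c1, c2, c3] y 2 (by decide) hy0')).symm
      rcases hy1 with h | h | h
      · refine List.mem_filterMap.mpr ⟨1, by decide, ?_⟩
        rw [show ([a1, a2, a3, b1, b2, b3, c1, c2, c3].getD 1 "") = a2 from rfl, if_pos h.symm]; decide
      · refine List.mem_filterMap.mpr ⟨4, by decide, ?_⟩
        rw [show ([a1, a2, a3, b1, b2, b3, c1, c2, c3].getD 4 "") = b2 from rfl, if_pos h.symm]; decide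
      · refine List.mem_filterMap.mpr ⟨5, by decide, ?_⟩
        rw [show ([a1, a2, a3, b1, b2, b3, c1, c2, c3].getD 5 "") = b3 from rfl, if_pos h.symm]; decide
    · rw [if_neg hy1]
      push_neg at hy1
      obtain ⟨k1, k2, k3⟩ := hy1
      refine (minAll2 _ (ds_far [a1, a2, a3, b1, b2, b3, c1, c2, c3] y 2 (by decide) ?_)).symm
      intro j hj hd
      interval_cases j <;>
        first
          | exact absurd hd (by decide)
          | exact hy0'
          | exact fun hh => k1 hh.symm
          | exact fun hh => k2 hh.symm
          | exact fun hh => k3 hh.symm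
  rw [if_neg h2]
  by_cases h3 : x = b1
  · rw [if_pos h3]
    have hag : x ∈ [a1, a2, a3, b1, b2, b3, c1, c2, c3] := by simp [h3]
    have hidx : PySem.List.index? [a1, a2, a3, b1, b2, b3, c1, c2, c3] x = some 3 := by
      rw [PySem.List.index?_cons_of_ne _ (show a1 ≠ x from fun hh => h0 hh.symm), PySem.List.index?_cons_of_ne _ (show a2 ≠ x from fun hh => h1 hh.symm), PySem.List.index?_cons_of_ne _ (show a3 ≠ x from fun hh => h2 hh.symm), h3, PySem.List.index?_cons_self]
      rfl
    rw [cost_found [a1, a2, a3, b1, b2, b3, c1, c2, c3] x y 3 hag hidx]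
    by_cases hy0 : y = b1
    · rw [if_pos hy0]
      refine (minMatchD _ _ 0 ?_ (ds_nonneg [a1, a2, a3, b1, b2, b3, c1, c2, c3] y ((3 / 3 : Nat) : Int) ((3 % 3 : Nat) : Int))).symm
      refine List.mem_filterMap.mpr ⟨3, by decide, ?_⟩
      rw [show ([a1, a2, a3, b1, b2, b3, c1, c2, c3].getD 3 "") = b1 from rfl, if_pos hy0.symm]; decide
    rw [if_neg hy0]
    have hy0' : ¬ (b1 = y) := fun hh => hy0 hh.symm
    by_cases hy1 : y = a1 ∨ y = a2 ∨ y = b2 ∨ y = c1 ∨ y = c2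
    · rw [if_pos hy1]
      refine (minMatchD _ _ 1 ?_ (ds_ge1 [a1, a2, a3, b1, b2, b3, c1, c2, c3] y 3 (by decide) hy0')).symm
      rcases hy1 with h | h | h | h | h
      · refine List.mem_filterMap.mpr ⟨0, by decide, ?_⟩
        rw [show ([a1, a2, a3, b1, b2, b3, c1, c2, c3].getD 0 "") = a1 from rfl, if_pos h.symm]; decide
      · refine List.mem_filterMap.mpr ⟨1, by decide, ?_⟩
        rw [show ([a1, a2, a3, b1, b2, b3, c1, c2, c3].getD 1 "") = a2 from rfl, if_pos h.symm]; decide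
      · refine List.mem_filterMap.mpr ⟨4, by decide, ?_⟩
        rw [show ([a1, a2, a3, b1, b2, b3, c1, c2, c3].getD 4 "") = b2 from rfl, if_pos h.symm]; decide
      · refine List.mem_filterMap.mpr ⟨6, by decide, ?_⟩
        rw [show ([a1, a2, a3, b1, b2, b3, c1, c2, c3].getD 6 "") = c1 from rfl, if_pos h.symm]; decide
      · refine List.mem_filterMap.mpr ⟨7, by decide, ?_⟩
        rw [show ([a1, a2, a3, b1, b2, b3, c1, c2, c3].getD 7 "") = c2 from rfl, if_pos h.symm]; decide
    · rw [if_neg hy1]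
      push_neg at hy1
      obtain ⟨k1, k2, k3, k4, k5⟩ := hy1
      refine (minAll2 _ (ds_far [a1, a2, a3, b1, b2, b3, c1, c2, c3] y 3 (by decide) ?_)).symm
      intro j hj hd
      interval_cases j <;>
        first
          | exact absurd hd (by decide)
          | exact hy0'
          | exact fun hh => k1 hh.symm
          | exact fun hh => k2 hh.symm
          | exact fun hh => k3 hh.symm
          | exact fun hh => k4 hh.symm
          | exact fun hh => k5 hh.symm
  rw [if_neg h3]
  by_cases h4 : x = b2
  · rw [if_pos h4]
    have hag : x ∈ [a1, a2, a3, b1, b2, b3, c1, c2, c3] := by simp [h4]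
    have hidx : PySem.List.index? [a1, a2, a3, b1, b2, b3, c1, c2, c3] x = some 4 := by
      rw [PySem.List.index?_cons_of_ne _ (show a1 ≠ x from fun hh => h0 hh.symm), PySem.List.index?_cons_of_ne _ (show a2 ≠ x from fun hh => h1 hh.symm), PySem.List.index?_cons_of_ne _ (show a3 ≠ x from fun hh => h2 hh.symm), PySem.List.index?_cons_of_ne _ (show b1 ≠ x from fun hh => h3 hh.symm), h4, PySem.List.index?_cons_self]
      rfl
    have hbg : y ∈ [a1, a2, a3, b1, b2, b3, c1, c2, c3] := hc hidx
    rw [cost_found [a1, a2, a3, b1, b2, b3, c1, c2, c3] x y 4 hag hidx]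
    by_cases hy0 : y = b2
    · rw [if_pos hy0]
      refine (minMatchD _ _ 0 ?_ (ds_nonneg [a1, a2, a3, b1, b2, b3, c1, c2, c3] y ((4 / 3 : Nat) : Int) ((4 % 3 : Nat) : Int))).symm
      refine List.mem_filterMap.mpr ⟨4, by decide, ?_⟩
      rw [show ([a1, a2, a3, b1, b2, b3, c1, c2, c3].getD 4 "") = b2 from rfl, if_pos hy0.symm]; decide
    rw [if_neg hy0]
    have hy0' : ¬ (b2 = y) := fun hh => hy0 hh.symm
    exact (minMatchNe _ _ 1 (ds_ne_nil _ _ _ _ (by simp) hbg) (ds_center [a1, a2, a3, b1, b2, b3, c1, c2, c3] y hy0')).symm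
  rw [if_neg h4]
  by_cases h5 : x = b3
  · rw [if_pos h5]
    have hag : x ∈ [a1, a2, a3, b1, b2, b3, c1, c2, c3] := by simp [h5]
    have hidx : PySem.List.index? [a1, a2, a3, b1, b2, b3, c1, c2, c3] x = some 5 := by
      rw [PySem.List.index?_cons_of_ne _ (show a1 ≠ x from fun hh => h0 hh.symm), PySem.List.index?_cons_of_ne _ (show a2 ≠ x from fun hh => h1 hh.symm), PySem.List.index?_cons_of_ne _ (show a3 ≠ x from fun hh => h2 hh.symm), PySem.List.index?_cons_of_ne _ (show b1 ≠ x from fun hh => h3 hh.symm), PySem.List.index?_cons_of_ne _ (show b2 ≠ x from fun hh => h4 hh.symm), h5, PySem.List.index?_cons_self]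
      rfl
    rw [cost_found [a1, a2, a3, b1, b2, b3, c1, c2, c3] x y 5 hag hidx]
    by_cases hy0 : y = b3
    · rw [if_pos hy0]
      refine (minMatchD _ _ 0 ?_ (ds_nonneg [a1, a2, a3, b1, b2, b3, c1, c2, c3] y ((5 / 3 : Nat) : Int) ((5 % 3 : Nat) : Int))).symm
      refine List.mem_filterMap.mpr ⟨5, by decide, ?_⟩
      rw [show ([a1, a2, a3, b1, b2, b3, c1, c2, c3].getD 5 "") = b3 from rfl, if_pos hy0.symm]; decide
    rw [if_neg hy0]
    have hy0' : ¬ (b3 = y) := fun hh => hy0 hh.symm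
    by_cases hy1 : y = a2 ∨ y = a3 ∨ y = b2 ∨ y = c2 ∨ y = c3
    · rw [if_pos hy1]
      refine (minMatchD _ _ 1 ?_ (ds_ge1 [a1, a2, a3, b1, b2, b3, c1, c2, c3] y 5 (by decide) hy0')).symm
      rcases hy1 with h | h | h | h | h
      · refine List.mem_filterMap.mpr ⟨1, by decide, ?_⟩
        rw [show ([a1, a2, a3, b1, b2, b3, c1, c2, c3].getD 1 "") = a2 from rfl, if_pos h.symm]; decide
      · refine List.mem_filterMap.mpr ⟨2, by decide, ?_⟩
        rw [show ([a1, a2, a3, b1, b2, b3, c1, c2, c3].getD 2 "") = a3 from rfl, if_pos h.symm]; decide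
      · refine List.mem_filterMap.mpr ⟨4, by decide, ?_⟩
        rw [show ([a1, a2, a3, b1, b2, b3, c1, c2, c3].getD 4 "") = b2 from rfl, if_pos h.symm]; decide
      · refine List.mem_filterMap.mpr ⟨7, by decide, ?_⟩
        rw [show ([a1, a2, a3, b1, b2, b3, c1, c2, c3].getD 7 "") = c2 from rfl, if_pos h.symm]; decide
      · refine List.mem_filterMap.mpr ⟨8, by decide, ?_⟩
        rw [show ([a1, a2, a3, b1, b2, b3, c1, c2, c3].getD 8 "") = c3 from rfl, if_pos h.symm]; decide
    · rw [if_neg hy1]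
      push_neg at hy1
      obtain ⟨k1, k2, k3, k4, k5⟩ := hy1
      refine (minAll2 _ (ds_far [a1, a2, a3, b1, b2, b3, c1, c2, c3] y 5 (by decide) ?_)).symm
      intro j hj hd
      interval_cases j <;>
        first
          | exact absurd hd (by decide)
          | exact hy0'
          | exact fun hh => k1 hh.symm
          | exact fun hh => k2 hh.symm
          | exact fun hh => k3 hh.symm
          | exact fun hh => k4 hh.symm
          | exact fun hh => k5 hh.symm
  rw [if_neg h5]
  by_cases h6 : x = c1
  · rw [if_pos h6]
    have hag : x ∈ [a1, a2, a3, b1, b2, b3, c1, c2, c3] := by simp [h6]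
    have hidx : PySem.List.index? [a1, a2, a3, b1, b2, b3, c1, c2, c3] x = some 6 := by
      rw [PySem.List.index?_cons_of_ne _ (show a1 ≠ x from fun hh => h0 hh.symm), PySem.List.index?_cons_of_ne _ (show a2 ≠ x from fun hh => h1 hh.symm), PySem.List.index?_cons_of_ne _ (show a3 ≠ x from fun hh => h2 hh.symm), PySem.List.index?_cons_of_ne _ (show b1 ≠ x from fun hh => h3 hh.symm), PySem.List.index?_cons_of_ne _ (show b2 ≠ x from fun hh => h4 hh.symm), PySem.List.index?_cons_of_ne _ (show b3 ≠ x from fun hh => h5 hh.symm), h6, PySem.List.index?_cons_self]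
      rfl
    rw [cost_found [a1, a2, a3, b1, b2, b3, c1, c2, c3] x y 6 hag hidx]
    by_cases hy0 : y = c1
    · rw [if_pos hy0]
      refine (minMatchD _ _ 0 ?_ (ds_nonneg [a1, a2, a3, b1, b2, b3, c1, c2, c3] y ((6 / 3 : Nat) : Int) ((6 % 3 : Nat) : Int))).symm
      refine List.mem_filterMap.mpr ⟨6, by decide, ?_⟩
      rw [show ([a1, a2, a3, b1, b2, b3, c1, c2, c3].getD 6 "") = c1 from rfl, if_pos hy0.symm]; decide
    rw [if_neg hy0]
    have hy0' : ¬ (c1 = y) := fun hh => hy0 hh.symm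
    by_cases hy1 : y = b1 ∨ y = b2 ∨ y = c2
    · rw [if_pos hy1]
      refine (minMatchD _ _ 1 ?_ (ds_ge1 [a1, a2, a3, b1, b2, b3, c1, c2, c3] y 6 (by decide) hy0')).symm
      rcases hy1 with h | h | h
      · refine List.mem_filterMap.mpr ⟨3, by decide, ?_⟩
        rw [show ([a1, a2, a3, b1, b2, b3, c1, c2, c3].getD 3 "") = b1 from rfl, if_pos h.symm]; decide
      · refine List.mem_filterMap.mpr ⟨4, by decide, ?_⟩
        rw [show ([a1, a2, a3, b1, b2, b3, c1, c2, c3].getD 4 "") = b2 from rfl, if_pos h.symm]; decide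
      · refine List.mem_filterMap.mpr ⟨7, by decide, ?_⟩
        rw [show ([a1, a2, a3, b1, b2, b3, c1, c2, c3].getD 7 "") = c2 from rfl, if_pos h.symm]; decide
    · rw [if_neg hy1]
      push_neg at hy1
      obtain ⟨k1, k2, k3⟩ := hy1
      refine (minAll2 _ (ds_far [a1, a2, a3, b1, b2, b3, c1, c2, c3] y 6 (by decide) ?_)).symm
      intro j hj hd
      interval_cases j <;>
        first
          | exact absurd hd (by decide)
          | exact hy0'
          | exact fun hh => k1 hh.symm
          | exact fun hh => k2 hh.symm
          | exact fun hh => k3 hh.symm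
  rw [if_neg h6]
  by_cases h7 : x = c2
  · rw [if_pos h7]
    have hag : x ∈ [a1, a2, a3, b1, b2, b3, c1, c2, c3] := by simp [h7]
    have hidx : PySem.List.index? [a1, a2, a3, b1, b2, b3, c1, c2, c3] x = some 7 := by
      rw [PySem.List.index?_cons_of_ne _ (show a1 ≠ x from fun hh => h0 hh.symm), PySem.List.index?_cons_of_ne _ (show a2 ≠ x from fun hh => h1 hh.symm), PySem.List.index?_cons_of_ne _ (show a3 ≠ x from fun hh => h2 hh.symm), PySem.List.index?_cons_of_ne _ (show b1 ≠ x from fun hh => h3 hh.symm), PySem.List.index?_cons_of_ne _ (show b2 ≠ x from fun hh => h4 hh.symm), PySem.List.index?_cons_of_ne _ (show b3 ≠ x from fun hh => h5 hh.symm), PySem.List.index?_cons_of_ne _ (show c1 ≠ x from fun hh => h6 hh.symm), h7, PySem.List.index?_cons_self]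
      rfl
    rw [cost_found [a1, a2, a3, b1, b2, b3, c1, c2, c3] x y 7 hag hidx]
    by_cases hy0 : y = c2
    · rw [if_pos hy0]
      refine (minMatchD _ _ 0 ?_ (ds_nonneg [a1, a2, a3, b1, b2, b3, c1, c2, c3] y ((7 / 3 : Nat) : Int) ((7 % 3 : Nat) : Int))).symm
      refine List.mem_filterMap.mpr ⟨7, by decide, ?_⟩
      rw [show ([a1, a2, a3, b1, b2, b3, c1, c2, c3].getD 7 "") = c2 from rfl, if_pos hy0.symm]; decide
    rw [if_neg hy0]
    have hy0' : ¬ (c2 = y) := fun hh => hy0 hh.symm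
    by_cases hy1 : y = b1 ∨ y = b2 ∨ y = b3 ∨ y = c1 ∨ y = c3
    · rw [if_pos hy1]
      refine (minMatchD _ _ 1 ?_ (ds_ge1 [a1, a2, a3, b1, b2, b3, c1, c2, c3] y 7 (by decide) hy0')).symm
      rcases hy1 with h | h | h | h | h
      · refine List.mem_filterMap.mpr ⟨3, by decide, ?_⟩
        rw [show ([a1, a2, a3, b1, b2, b3, c1, c2, c3].getD 3 "") = b1 from rfl, if_pos h.symm]; decide
      · refine List.mem_filterMap.mpr ⟨4, by decide, ?_⟩
        rw [show ([a1, a2, a3, b1, b2, b3, c1, c2, c3].getD 4 "") = b2 from rfl, if_pos h.symm]; decide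
      · refine List.mem_filterMap.mpr ⟨5, by decide, ?_⟩
        rw [show ([a1, a2, a3, b1, b2, b3, c1, c2, c3].getD 5 "") = b3 from rfl, if_pos h.symm]; decide
      · refine List.mem_filterMap.mpr ⟨6, by decide, ?_⟩
        rw [show ([a1, a2, a3, b1, b2, b3, c1, c2, c3].getD 6 "") = c1 from rfl, if_pos h.symm]; decide
      · refine List.mem_filterMap.mpr ⟨8, by decide, ?_⟩
        rw [show ([a1, a2, a3, b1, b2, b3, c1, c2, c3].getD 8 "") = c3 from rfl, if_pos h.symm]; decide
    · rw [if_neg hy1]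
      push_neg at hy1
      obtain ⟨k1, k2, k3, k4, k5⟩ := hy1
      refine (minAll2 _ (ds_far [a1, a2, a3, b1, b2, b3, c1, c2, c3] y 7 (by decide) ?_)).symm
      intro j hj hd
      interval_cases j <;>
        first
          | exact absurd hd (by decide)
          | exact hy0'
          | exact fun hh => k1 hh.symm
          | exact fun hh => k2 hh.symm
          | exact fun hh => k3 hh.symm
          | exact fun hh => k4 hh.symm
          | exact fun hh => k5 hh.symm
  rw [if_neg h7]
  by_cases h8 : x = c3
  · rw [if_pos h8]
    have hag : x ∈ [a1, a2, a3, b1, b2, b3, c1, c2, c3] := by simp [h8]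
    have hidx : PySem.List.index? [a1, a2, a3, b1, b2, b3, c1, c2, c3] x = some 8 := by
      rw [PySem.List.index?_cons_of_ne _ (show a1 ≠ x from fun hh => h0 hh.symm), PySem.List.index?_cons_of_ne _ (show a2 ≠ x from fun hh => h1 hh.symm), PySem.List.index?_cons_of_ne _ (show a3 ≠ x from fun hh => h2 hh.symm), PySem.List.index?_cons_of_ne _ (show b1 ≠ x from fun hh => h3 hh.symm), PySem.List.index?_cons_of_ne _ (show b2 ≠ x from fun hh => h4 hh.symm), PySem.List.index?_cons_of_ne _ (show b3 ≠ x from fun hh => h5 hh.symm), PySem.List.index?_cons_of_ne _ (show c1 ≠ x from fun hh => h6 hh.symm), PySem.List.index?_cons_of_ne _ (show c2 ≠ x from fun hh => h7 hh.symm), h8, PySem.List.index?_cons_self]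
      rfl
    rw [cost_found [a1, a2, a3, b1, b2, b3, c1, c2, c3] x y 8 hag hidx]
    by_cases hy0 : y = c3
    · rw [if_pos hy0]
      refine (minMatchD _ _ 0 ?_ (ds_nonneg [a1, a2, a3, b1, b2, b3, c1, c2, c3] y ((8 / 3 : Nat) : Int) ((8 % 3 : Nat) : Int))).symm
      refine List.mem_filterMap.mpr ⟨8, by decide, ?_⟩
      rw [show ([a1, a2, a3, b1, b2, b3, c1, c2, c3].getD 8 "") = c3 from rfl, if_pos hy0.symm]; decide
    rw [if_neg hy0]
    have hy0' : ¬ (c3 = y) := fun hh => hy0 hh.symm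
    by_cases hy1 : y = c2 ∨ y = b2 ∨ y = b3
    · rw [if_pos hy1]
      refine (minMatchD _ _ 1 ?_ (ds_ge1 [a1, a2, a3, b1, b2, b3, c1, c2, c3] y 8 (by decide) hy0')).symm
      rcases hy1 with h | h | h
      · refine List.mem_filterMap.mpr ⟨7, by decide, ?_⟩
        rw [show ([a1, a2, a3, b1, b2, b3, c1, c2, c3].getD 7 "") = c2 from rfl, if_pos h.symm]; decide
      · refine List.mem_filterMap.mpr ⟨4, by decide, ?_⟩
        rw [show ([a1, a2, a3, b1, b2, b3, c1, c2, c3].getD 4 "") = b2 from rfl, if_pos h.symm]; decide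
      · refine List.mem_filterMap.mpr ⟨5, by decide, ?_⟩
        rw [show ([a1, a2, a3, b1, b2, b3, c1, c2, c3].getD 5 "") = b3 from rfl, if_pos h.symm]; decide
    · rw [if_neg hy1]
      push_neg at hy1
      obtain ⟨k1, k2, k3⟩ := hy1
      refine (minAll2 _ (ds_far [a1, a2, a3, b1, b2, b3, c1, c2, c3] y 8 (by decide) ?_)).symm
      intro j hj hd
      interval_cases j <;>
        first
          | exact absurd hd (by decide)
          | exact hy0'
          | exact fun hh => k1 hh.symm
          | exact fun hh => k2 hh.symm
          | exact fun hh => k3 hh.symm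
  rw [if_neg h8]
  have hxg : x ∉ [a1, a2, a3, b1, b2, b3, c1, c2, c3] := by simp [h0, h1, h2, h3, h4, h5, h6, h7, h8]
  rw [cost_noguard [a1, a2, a3, b1, b2, b3, c1, c2, c3] x y hxg]

lemma index_peel (a : String) (l : List String) (x : String) (n : Nat)
    (hne : ¬ x = a) (h : PySem.List.index? (a :: l) x = some (n + 1)) :
    PySem.List.index? l x = some n := by
  rw [PySem.List.index?_cons_of_ne _ (fun he => hne he.symm)] at h
  cases o : PySem.List.index? l x with
  | none => rw [o] at h; simp at h
  | some m =>
    rw [o] at h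
    simp only [Option.map_some, Option.some.injEq] at h
    have : m = n := by omega
    rw [this]

lemma index_head (a : String) (l : List String) (x : String) (n : Nat)
    (he : x = a) (h : PySem.List.index? (a :: l) x = some (n + 1)) : False := by
  rw [← he, PySem.List.index?_cons_self] at h
  simp at h

lemma index4_decode (a1 a2 a3 b1 b2 b3 c1 c2 c3 x : String)
    (h : PySem.List.index? [a1, a2, a3, b1, b2, b3, c1, c2, c3] x = some 4) :
    x = b2 ∧ ¬ x = a1 ∧ ¬ x = a2 ∧ ¬ x = a3 ∧ ¬ x = b1 := by
  by_cases e1 : x = a1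
  · exact absurd h (fun h => index_head a1 _ x 3 e1 h)
  have h1 := index_peel a1 _ x 3 e1 h
  by_cases e2 : x = a2
  · exact absurd h1 (fun h => index_head a2 _ x 2 e2 h)
  have h2 := index_peel a2 _ x 2 e2 h1
  by_cases e3 : x = a3
  · exact absurd h2 (fun h => index_head a3 _ x 1 e3 h)
  have h3 := index_peel a3 _ x 1 e3 h2
  by_cases e4 : x = b1
  · exact absurd h3 (fun h => index_head b1 _ x 0 e4 h)
  have h4 := index_peel b1 _ x 0 e4 h3
  by_cases e5 : x = b2
  · exact ⟨e5, e1, e2, e3, e4⟩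
  · rw [PySem.List.index?_cons_of_ne _ (fun he => e5 he.symm)] at h4
    cases o : PySem.List.index? [b3, c1, c2, c3] x with
    | none => rw [o] at h4; simp at h4
    | some m => rw [o] at h4; simp at h4

lemma step_lt_cost (a1 a2 a3 b1 b2 b3 c1 c2 c3 x y : String)
    (h4 : PySem.List.index? [a1, a2, a3, b1, b2, b3, c1, c2, c3] x = some 4)
    (hy : y ∉ [a1, a2, a3, b1, b2, b3, c1, c2, c3]) :
    stepA a1 a2 a3 b1 b2 b3 c1 c2 c3 x y <
    entryTime_cost [a1, a2, a3, b1, b2, b3, c1, c2, c3] x y := by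
  obtain ⟨hxb2, n1, n2, n3, n4⟩ := index4_decode a1 a2 a3 b1 b2 b3 c1 c2 c3 x h4
  have hxg : x ∈ [a1, a2, a3, b1, b2, b3, c1, c2, c3] := by simp [hxb2]
  have hyb2 : ¬ (y = b2) := fun e => hy (by simp [e])
  rw [cost_found [a1, a2, a3, b1, b2, b3, c1, c2, c3] x y 4 hxg h4,
    minAll2 _ (ds_none [a1, a2, a3, b1, b2, b3, c1, c2, c3] y _ _ rfl hy)]
  simp only [stepA, if_neg n1, if_neg n2, if_neg n3, if_neg n4, if_pos hxb2, if_neg hyb2]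
  omega

lemma stepA_notmem (a1 a2 a3 b1 b2 b3 c1 c2 c3 x y : String)
    (hx : x ∉ [a1, a2, a3, b1, b2, b3, c1, c2, c3]) :
    stepA a1 a2 a3 b1 b2 b3 c1 c2 c3 x y = 0 := by
  simp only [List.mem_cons, List.not_mem_nil, or_false] at hx
  push_neg at hx
  obtain ⟨m1, m2, m3, m4, m5, m6, m7, m8, m9⟩ := hx
  simp only [stepA, if_neg m1, if_neg m2, if_neg m3, if_neg m4, if_neg m5, if_neg m6,
    if_neg m7, if_neg m8, if_neg m9]

lemma step_le_cost (a1 a2 a3 b1 b2 b3 c1 c2 c3 x y : String) :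
    stepA a1 a2 a3 b1 b2 b3 c1 c2 c3 x y ≤
    entryTime_cost [a1, a2, a3, b1, b2, b3, c1, c2, c3] x y := by
  by_cases hx : x ∈ [a1, a2, a3, b1, b2, b3, c1, c2, c3]
  · by_cases h4 : PySem.List.index? [a1, a2, a3, b1, b2, b3, c1, c2, c3] x = some 4
    · by_cases hy : y ∈ [a1, a2, a3, b1, b2, b3, c1, c2, c3]
      · exact le_of_eq (step_eq_cost a1 a2 a3 b1 b2 b3 c1 c2 c3 x y (fun _ => hy))
      · exact le_of_lt (step_lt_cost a1 a2 a3 b1 b2 b3 c1 c2 c3 x y h4 hy)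
    · exact le_of_eq (step_eq_cost a1 a2 a3 b1 b2 b3 c1 c2 c3 x y (fun h => absurd h h4))
  · rw [cost_noguard _ _ _ hx, stepA_notmem a1 a2 a3 b1 b2 b3 c1 c2 c3 x y hx]

lemma sum_map_lt {α : Type} (l : List α) (f g : α → Int)
    (hle : ∀ a ∈ l, f a ≤ g a) (a : α) (ha : a ∈ l) (hlt : f a < g a) :
    (l.map f).sum < (l.map g).sum := by
  induction l with
  | nil => cases ha
  | cons b t ih =>
    simp only [List.map_cons, List.sum_cons]
    rcases List.mem_cons.mp ha with h | h
    · subst h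
      have ht : (t.map f).sum ≤ (t.map g).sum :=
        List.sum_le_sum (fun z hz => hle z (List.mem_cons_of_mem _ hz))
      omega
    · have hb := hle b (List.mem_cons_self ..)
      have := ih (fun z hz => hle z (List.mem_cons_of_mem _ hz)) h
      omega

-- ===== VERDICT (by name: the statements are the Claim_ definitions above) =====
theorem entryTime_spec : Claim_unchanged_entryTime := by
  intro s keypad _ hpre
  unfold Spec_entryTime
  intro hnd
  match keypad, hpre with
  | a1 :: a2 :: a3 :: b1 :: b2 :: b3 :: c1 :: c2 :: c3 :: rest, _ =>
    show (List.range s.length).foldl (entryTime_body a1 a2 a3 b1 b2 b3 c1 c2 c3 s) 0 = _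
    rw [loopA_eq]
    have htake : (List.range 9).map (fun j => (a1 :: a2 :: a3 :: b1 :: b2 :: b3 :: c1 :: c2 :: c3 :: rest).getD j "") =
        [a1, a2, a3, b1, b2, b3, c1, c2, c3] := rfl
    have htake2 : (a1 :: a2 :: a3 :: b1 :: b2 :: b3 :: c1 :: c2 :: c3 :: rest).take 9 =
        [a1, a2, a3, b1, b2, b3, c1, c2, c3] := rfl
    unfold D_entryTime at hnd
    push_neg at hnd
    rw [htake2] at hnd
    simp only [entryTime_alt, htake, zero_add]
    exact congrArg List.sum (List.map_congr_left (fun ab hab =>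
      step_eq_cost a1 a2 a3 b1 b2 b3 c1 c2 c3 ab.1 ab.2 (hnd ab hab)))

theorem entryTime_changed : Claim_changed_entryTime := by
  unfold Claim_changed_entryTime; decide

theorem entryTime_tight : Claim_exact_entryTime := by
  intro s keypad _ hpre hd
  match keypad, hpre with
  | a1 :: a2 :: a3 :: b1 :: b2 :: b3 :: c1 :: c2 :: c3 :: rest, _ =>
    show (List.range s.length).foldl (entryTime_body a1 a2 a3 b1 b2 b3 c1 c2 c3 s) 0 ≠ _
    rw [loopA_eq]
    have htake : (List.range 9).map (fun j => (a1 :: a2 :: a3 :: b1 :: b2 :: b3 :: c1 :: c2 :: c3 :: rest).getD j "") =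
        [a1, a2, a3, b1, b2, b3, c1, c2, c3] := rfl
    have htake2 : (a1 :: a2 :: a3 :: b1 :: b2 :: b3 :: c1 :: c2 :: c3 :: rest).take 9 =
        [a1, a2, a3, b1, b2, b3, c1, c2, c3] := rfl
    unfold D_entryTime at hd
    rw [htake2] at hd
    obtain ⟨ab, hab, hx4, hy⟩ := hd
    simp only [entryTime_alt, htake, zero_add]
    exact ne_of_lt (sum_map_lt (s.zip s.tail)
      (fun ab => stepA a1 a2 a3 b1 b2 b3 c1 c2 c3 ab.1 ab.2)
      (fun ab => entryTime_cost [a1, a2, a3, b1, b2, b3, c1, c2, c3] ab.1 ab.2)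
      (fun ab _ => step_le_cost a1 a2 a3 b1 b2 b3 c1 c2 c3 ab.1 ab.2)
      ab hab (step_lt_cost a1 a2 a3 b1 b2 b3 c1 c2 c3 ab.1 ab.2 hx4 hy))
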